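-- pv_equiv track=rewrite | github.com/gigi090782/otus-ml-basic-2024-08 | task4.py | get_correct_name
-- ===== SOURCE A (Python) =====
-- def get_correct_name(input_name:str)->str:
--     while input_name.find("  ")!=-1:
--         input_name = input_name.replace("  "," ")
--     while input_name.find("--") != -1:
--         input_name = input_name.replace("--", "-")
--     while input_name.find("- ") != -1:
--         input_name = input_name.replace("- ", "-")
--     while input_name.find(" -") != -1:
--         input_name = input_name.replace(" -", "-")
--     result_string = input_name[0].upper()
--     if len(input_name) > 1:
--         index = 1
--         while index < len(input_name):
--             if ((input_name[index] != " " and input_name[index-1] == " ") or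
--                 (input_name[index] != "-" and input_name[index-1] == "-")):
--                 result_string += input_name[index].upper()
--             else:
--                 result_string += input_name[index]
--             index += 1
--     return result_string
-- ===== SOURCE B (Python) =====
-- def get_correct_name(input_name: str) -> str:
--     """Normalize a name: collapse each run of spaces/dashes to a single
--     separator (dash wins over space), and capitalize the first letter and
--     every letter that follows a separator.  Single linear pass."""
--     out = []
--     run = None   # pending collapsed separator of the current space/dash run
--     for ch in input_name:
--         if ch == ' ' or ch == '-':
--             run = '-' if (ch == '-' or run == '-') else ' '
--         elif run is not None:
--             out.append(run)
--             out.append(ch.upper())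
--             run = None
--         elif not out:
--             out.append(ch.upper())
--         else:
--             out.append(ch)
--     if run is not None:
--         out.append(run)
--     return ''.join(out)
-- ===== Notes on version B (the rewrite author's own statement) =====
-- stated objective: faster
-- what changed: Replaces A's four repeated whole-string replace-until-fixpoint loops plus an index loop by one linear pass that collapses each space/dash run to a single separator (dash wins) and capitalizes on the fly; Pre_ excludes only the empty string, on which A raises IndexError.
-- intended difference: On inputs where a dash is followed by one or more spaces and then another dash, A's replacement order leaves consecutive dashes in its output while B collapses the whole mixed space/dash run to a single dash, the intended normalization. — e.g. on get_correct_name("a- -b"): A returns "A--B", B returns "A-B"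
import Mathlib
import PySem

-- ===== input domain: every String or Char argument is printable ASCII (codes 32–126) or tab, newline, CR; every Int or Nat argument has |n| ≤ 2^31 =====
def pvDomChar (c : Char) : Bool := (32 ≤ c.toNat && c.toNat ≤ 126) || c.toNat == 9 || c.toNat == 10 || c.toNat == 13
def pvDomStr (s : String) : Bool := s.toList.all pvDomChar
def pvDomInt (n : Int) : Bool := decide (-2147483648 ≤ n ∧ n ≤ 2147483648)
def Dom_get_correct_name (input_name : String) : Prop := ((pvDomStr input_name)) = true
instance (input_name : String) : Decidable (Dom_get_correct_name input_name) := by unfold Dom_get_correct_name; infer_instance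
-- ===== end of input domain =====

-- B replaces A's four replace-until-fixpoint passes and index loop by one linear pass
-- (collapse each space/dash run to one separator, dash wins, capitalize on the fly);
-- outside D_ the results agree; A raises IndexError on "" (excluded by Pre_).


-- ===== PORT A =====
-- each `while s.find(pat) != -1: s = s.replace(pat, rep)` loop, run with enough fuel
-- (every iteration strictly shortens s, so fuel = len(s) reaches the fixpoint)
def gcnWhile (pat rep : String) : Nat → String → String
  | 0, s => s
  | fuel + 1, s =>
    if PySem.Str.find s pat ≠ -1 then gcnWhile pat rep fuel (PySem.Str.replace s pat rep) else s

-- index = 1; while index < len(input_name): … result_string += …   (fuel = len - index)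
def gcnCapGo (s : List Char) : Nat → Nat → List Char → List Char
  | _, 0, res => res
  | index, fuel + 1, res =>
    if index < s.length then
      gcnCapGo s (index + 1) fuel
        (res ++ [if (s.getD index ' ' ≠ ' ' ∧ s.getD (index - 1) ' ' = ' ') ∨
                    (s.getD index ' ' ≠ '-' ∧ s.getD (index - 1) ' ' = '-')
                 then PySem.Chars.upperChar (s.getD index ' ') else s.getD index ' '])
    else res

def get_correct_name (input_name : String) : String :=
  let s1 := gcnWhile "  " " " input_name.toList.length input_name
  let s2 := gcnWhile "--" "-" s1.toList.length s1
  let s3 := gcnWhile "- " "-" s2.toList.length s2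
  let s4 := gcnWhile " -" "-" s3.toList.length s3
  match PySem.Str.pyGet? s4 0 with
  | none => ""   -- Python raises IndexError here (empty input; excluded by Pre_)
  | some c =>
    let res := [PySem.Chars.upperChar c]
    if 1 < s4.toList.length then String.ofList (gcnCapGo s4.toList 1 s4.toList.length res)
    else String.ofList res

-- ===== PORT B =====
-- one fold step of Source B's single pass: state = (emitted output, pending collapsed separator)
def gcnStep (st : List Char × Option Char) (ch : Char) : List Char × Option Char :=
  if ch = ' ' ∨ ch = '-' then
    (st.1, some (if ch = '-' ∨ st.2 = some '-' then '-' else ' '))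
  else
    match st.2 with
    | some r => (st.1 ++ [r, PySem.Chars.upperChar ch], none)
    | none => if st.1 = [] then ([PySem.Chars.upperChar ch], none) else (st.1 ++ [ch], none)

def get_correct_name_alt (input_name : String) : String :=
  let st := input_name.toList.foldl gcnStep ([], none)
  String.ofList (st.1 ++ st.2.toList)

-- ===== PRECONDITION & SPEC =====
-- Pre_ excludes only the empty string, on which A raises IndexError at input_name[0].
def Pre_get_correct_name (input_name : String) : Prop := input_name ≠ ""
instance (input_name : String) : Decidable (Pre_get_correct_name input_name) := by
  unfold Pre_get_correct_name; infer_instance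

def pvWitness_get_correct_name : String := "to-be  named"

-- On inputs containing a dash, one or more spaces, then a dash, A's replacement order
-- leaves two or more consecutive dashes while B collapses the whole mixed run to a
-- single '-', the intended normalization.
-- (state machine: 0 = nothing, 1 = saw '-', 2 = saw '-' then spaces, 3 = pattern found)
def D_get_correct_name (input_name : String) : Prop :=
  input_name.toList.foldl
    (fun s c => if s = 3 ∨ c = '-' ∧ s = 2 then 3 else
      if c = '-' then 1 else if c = ' ' ∧ s ≠ 0 then 2 else 0) (0 : Nat) = 3
instance (input_name : String) : Decidable (D_get_correct_name input_name) := by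
  unfold D_get_correct_name; infer_instance

def Spec_get_correct_name (input_name : String) (out : String) : Prop :=
  ¬ D_get_correct_name input_name → out = get_correct_name_alt input_name
instance (input_name : String) (out : String) : Decidable (Spec_get_correct_name input_name out) := by
  unfold Spec_get_correct_name; infer_instance

def pvDiffWitness_get_correct_name : String := "a- -b"
def pvDiffWitnessOut_get_correct_name : String × String := ("A--B", "A-B")

-- ===== CLAIM =====
def Claim_unchanged_get_correct_name : Prop := ∀ (input_name : String),
  Dom_get_correct_name input_name → Pre_get_correct_name input_name →
  Spec_get_correct_name input_name (get_correct_name input_name)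
def Claim_changed_get_correct_name : Prop :=
  Dom_get_correct_name (pvDiffWitness_get_correct_name) ∧
  Pre_get_correct_name (pvDiffWitness_get_correct_name) ∧
  D_get_correct_name (pvDiffWitness_get_correct_name) ∧
  get_correct_name (pvDiffWitness_get_correct_name) = pvDiffWitnessOut_get_correct_name.1 ∧
  get_correct_name_alt (pvDiffWitness_get_correct_name) = pvDiffWitnessOut_get_correct_name.2 ∧
  pvDiffWitnessOut_get_correct_name.1 ≠ pvDiffWitnessOut_get_correct_name.2

-- ===== LEMMAS AND PROOFS =====

-- D_'s region, scanned in one linear pass: does the input contain a dash, then one or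
-- more spaces, then a dash (the runs A's replacement order mis-collapses)?
def pvAfterSp : List Char → Bool
  | [] => false
  | c :: u => if c = ' ' then pvAfterSp u else c = '-'

def pvAfterD : List Char → Bool
  | [] => false
  | c :: u => c = ' ' && pvAfterSp u

def pvHasDSD : List Char → Bool
  | [] => false
  | c :: t => (c = '-' && pvAfterD t) || pvHasDSD t



-- list-level description of one Python `s.replace(ab, r)` pass (two-char pattern,
-- one-char replacement), used by the proofs below
def pvRepl2 (a b r : Char) : List Char → List Char
  | [] => []
  | [x] => [x]
  | x :: y :: t => if x = a ∧ y = b then r :: pvRepl2 a b r t else x :: pvRepl2 a b r (y :: t)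



-- ----- infix helpers -----
theorem pvInf2_nil (a b : Char) : ¬ ([a, b] <:+: ([] : List Char)) := by simp

theorem pvInf2_single (a b x : Char) : ¬ ([a, b] <:+: [x]) := by
  simp [List.infix_cons_iff]

theorem pvInf2_cons (a b x y : Char) (t : List Char) :
    ([a, b] <:+: x :: y :: t) ↔ (x = a ∧ y = b) ∨ [a, b] <:+: y :: t := by
  rw [List.infix_cons_iff]
  constructor
  · rintro (⟨u, hu⟩ | h)
    · simp at hu; exact Or.inl ⟨hu.1.symm, hu.2.1.symm⟩
    · exact Or.inr h
  · rintro (⟨rfl, rfl⟩ | h)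
    · exact Or.inl ⟨t, rfl⟩
    · exact Or.inr h

-- ----- one replace pass: bridge to PySem -----
theorem pvRepl2_go (a b r : Char) : ∀ (fuel : Nat) (l acc : List Char), l.length ≤ fuel →
    PySem.Chars.replace.go [a, b] [r] fuel l acc = acc.reverse ++ pvRepl2 a b r l := by
  intro fuel
  induction fuel with
  | zero =>
    intro l acc h
    have hl : l = [] := List.eq_nil_of_length_eq_zero (Nat.le_zero.mp h)
    subst hl
    simp [PySem.Chars.replace.go, pvRepl2]
  | succ n ih =>
    intro l acc h
    match l with
    | [] => simp [PySem.Chars.replace.go, pvRepl2]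
    | [x] =>
      have hpre : [a, b].isPrefixOf [x] = false := by
        simp [List.isPrefixOf]
      simp only [PySem.Chars.replace.go, hpre]
      rw [ih [] (x :: acc) (by simp)]
      simp [pvRepl2]
    | x :: y :: t =>
      simp only [PySem.Chars.replace.go]
      by_cases hxy : x = a ∧ y = b
      · obtain ⟨rfl, rfl⟩ := hxy
        have hpre : [x, y].isPrefixOf (x :: y :: t) = true := by
          simp [List.isPrefixOf]
        rw [hpre]
        simp only [if_true]
        rw [ih _ _ (by simp at h ⊢; omega)]
        simp [pvRepl2]
      · have hpre : [a, b].isPrefixOf (x :: y :: t) = false := by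
          simp [List.isPrefixOf]
          intro h1 h2; exact hxy ⟨h1.symm, h2.symm⟩
        rw [hpre]
        simp only [Bool.false_eq_true, if_false]
        rw [ih _ _ (by simp at h ⊢; omega)]
        rw [pvRepl2]
        simp [hxy]

theorem pvReplace_eq (a b r : Char) (s pat rep : String)
    (hp : pat.toList = [a, b]) (hr : rep.toList = [r]) :
    (PySem.Str.replace s pat rep).toList = pvRepl2 a b r s.toList := by
  rw [PySem.Str.toList_replace, hp, hr]
  rw [PySem.Chars.replace]
  simp only [List.isEmpty_cons, if_false]
  rw [pvRepl2_go a b r s.toList.length s.toList [] le_rfl]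
  simp

theorem pvFind_iff (a b : Char) (s pat : String) (hp : pat.toList = [a, b]) :
    PySem.Str.find s pat ≠ -1 ↔ [a, b] <:+: s.toList := by
  rw [PySem.Str.find_ne_neg_one_iff, hp]

theorem pvRepl2_id (a b r : Char) (l : List Char) (h : ¬ ([a, b] <:+: l)) :
    pvRepl2 a b r l = l := by
  induction l with
  | nil => simp [pvRepl2]
  | cons x t ih =>
    match t, ih with
    | [], _ => simp [pvRepl2]
    | y :: t', ih =>
      rw [pvInf2_cons] at h
      push Not at h
      rw [pvRepl2]
      rw [if_neg (by intro hc; exact h.1 hc.1 hc.2)]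
      rw [ih h.2]

theorem pvRepl2_length_le (a b r : Char) (l : List Char) :
    (pvRepl2 a b r l).length ≤ l.length := by
  induction l using pvRepl2.induct (a := a) (b := b) with
  | case1 => simp [pvRepl2]
  | case2 x => simp [pvRepl2]
  | case3 x y t h ih => simp only [pvRepl2, if_pos h]; simp at ih ⊢; omega
  | case4 x y t h ih => simp only [pvRepl2, if_neg h]; simp at ih ⊢; omega

theorem pvRepl2_length_lt (a b r : Char) (l : List Char) (h : [a, b] <:+: l) :
    (pvRepl2 a b r l).length < l.length := by
  induction l using pvRepl2.induct (a := a) (b := b) with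
  | case1 => exact absurd h (pvInf2_nil a b)
  | case2 x => exact absurd h (pvInf2_single a b x)
  | case3 x y t hc ih =>
    have := pvRepl2_length_le a b r t
    simp only [pvRepl2, if_pos hc]; simp at this ⊢; omega
  | case4 x y t hc ih =>
    rw [pvInf2_cons] at h
    rcases h with h | h
    · exact absurd h hc
    · have := ih h
      simp only [pvRepl2, if_neg hc]; simp at this ⊢; omega

theorem pvRepl2_ne_nil (a b r : Char) (l : List Char) (h : l ≠ []) :
    pvRepl2 a b r l ≠ [] := by
  match l with
  | [] => exact absurd rfl h
  | [x] => simp [pvRepl2]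
  | x :: y :: t => rw [pvRepl2]; split <;> simp

theorem pvReplace_lt (a b r : Char) (s pat rep : String)
    (hp : pat.toList = [a, b]) (hr : rep.toList = [r])
    (h : PySem.Str.find s pat ≠ -1) :
    (PySem.Str.replace s pat rep).toList.length < s.toList.length := by
  rw [pvReplace_eq a b r s pat rep hp hr]
  exact pvRepl2_length_lt a b r _ ((pvFind_iff a b s pat hp).mp h)


-- ----- canonical normal form: each space/dash run collapsed to one separator (dash wins) -----
mutual
def pvNrm : List Char → List Char
  | [] => []
  | c :: t => if c = ' ' ∨ c = '-' then pvNrmRun c t else c :: pvNrm t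

def pvNrmRun (a : Char) : List Char → List Char
  | [] => [a]
  | c :: t => if c = '-' then pvNrmRun '-' t
              else if c = ' ' then pvNrmRun a t
              else a :: c :: pvNrm t
end


def pvStep (s : Nat) (c : Char) : Nat :=
  if s = 3 ∨ c = '-' ∧ s = 2 then 3 else if c = '-' then 1 else if c = ' ' ∧ s ≠ 0 then 2 else 0

theorem pvAuto_spec : ∀ l : List Char,
    (l.foldl pvStep 0 = 3 ↔ pvHasDSD l = true) ∧
    (l.foldl pvStep 1 = 3 ↔ (pvAfterD l = true ∨ pvHasDSD l = true)) ∧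
    (l.foldl pvStep 2 = 3 ↔ (pvAfterSp l = true ∨ pvHasDSD l = true)) ∧
    (l.foldl pvStep 3 = 3) := by
  intro l
  induction l with
  | nil => simp [pvHasDSD, pvAfterD, pvAfterSp]
  | cons c t ih =>
    obtain ⟨ih0, ih1, ih2, ih3⟩ := ih
    by_cases hc : c = '-'
    · subst hc
      refine ⟨?_, ?_, ?_, ?_⟩ <;> rw [List.foldl_cons]
      · rw [show pvStep 0 '-' = 1 from rfl, ih1, pvHasDSD]
        simp
      · rw [show pvStep 1 '-' = 1 from rfl, ih1, pvHasDSD, pvAfterD]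
        simp
      · rw [show pvStep 2 '-' = 3 from rfl, pvHasDSD, pvAfterSp]
        simp [ih3]
      · rw [show pvStep 3 '-' = 3 from rfl]
        exact ih3
    · by_cases hs : c = ' '
      · subst hs
        refine ⟨?_, ?_, ?_, ?_⟩ <;> rw [List.foldl_cons]
        · rw [show pvStep 0 ' ' = 0 from rfl, ih0, pvHasDSD]
          simp
        · rw [show pvStep 1 ' ' = 2 from rfl, ih2, pvHasDSD, pvAfterD]
          simp
        · rw [show pvStep 2 ' ' = 2 from rfl, ih2, pvHasDSD, pvAfterSp]
          simp
        · rw [show pvStep 3 ' ' = 3 from rfl]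
          exact ih3
      · have e0 : pvStep 0 c = 0 := by simp [pvStep, hc, hs]
        have e1 : pvStep 1 c = 0 := by simp [pvStep, hc, hs]
        have e2 : pvStep 2 c = 0 := by simp [pvStep, hc, hs]
        have e3 : pvStep 3 c = 3 := by simp [pvStep]
        refine ⟨?_, ?_, ?_, ?_⟩ <;> rw [List.foldl_cons]
        · rw [e0, ih0, pvHasDSD]
          simp [hc]
        · rw [e1, ih0, pvHasDSD, pvAfterD]
          simp [hc, hs]
        · rw [e2, ih0, pvHasDSD, pvAfterSp]
          simp [hc, hs]
        · rw [e3]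
          exact ih3

theorem pvD_iff (s : String) : D_get_correct_name s ↔ pvHasDSD s.toList = true := by
  unfold D_get_correct_name
  exact (pvAuto_spec s.toList).1

theorem pvRepl2_head (a b r : Char) (t : List Char) (h : Char)
    (hh : (pvRepl2 a b r t).head? = some h) :
    t.head? = some h ∨ (h = r ∧ t.head? = some a) := by
  match t with
  | [] => simp [pvRepl2] at hh
  | [x] => simp [pvRepl2] at hh; exact Or.inl (by simp [hh])
  | x :: y :: t' =>
    rw [pvRepl2] at hh
    split at hh
    · rename_i hm
      simp at hh
      exact Or.inr ⟨hh.symm, by simp [hm.1]⟩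
    · simp at hh
      exact Or.inl (by simp [hh])

-- ----- generic while-loop lemmas -----
theorem gcnWhile_exit (a b : Char) (pat rep : String) (hp : pat.toList = [a, b])
    (hr : rep.toList = [r]) :
    ∀ (fuel : Nat) (s : String), s.toList.length ≤ fuel →
      ¬ ([a, b] <:+: (gcnWhile pat rep fuel s).toList) := by
  intro fuel
  induction fuel with
  | zero =>
    intro s h
    have : s.toList = [] := List.eq_nil_of_length_eq_zero (Nat.le_zero.mp h)
    rw [gcnWhile, this]
    exact pvInf2_nil a b
  | succ n ih =>
    intro s h
    rw [gcnWhile]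
    split
    · rename_i hf
      exact ih _ (by have := pvReplace_lt a b r s pat rep hp hr hf; omega)
    · rename_i hf
      rw [not_not] at hf
      intro hcon
      exact ((pvFind_iff a b s pat hp).mpr hcon) hf

theorem gcnWhile_inv (a b r : Char) (pat rep : String) (hp : pat.toList = [a, b])
    (hr : rep.toList = [r]) (P : List Char → Prop)
    (hstep : ∀ m, P m → P (pvRepl2 a b r m)) :
    ∀ (fuel : Nat) (s : String), P s.toList → P ((gcnWhile pat rep fuel s).toList) := by
  intro fuel
  induction fuel with
  | zero => intro s hP; rw [gcnWhile]; exact hP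
  | succ n ih =>
    intro s hP
    rw [gcnWhile]
    split
    · exact ih _ (by rw [pvReplace_eq a b r s pat rep hp hr]; exact hstep _ hP)
    · exact hP

theorem gcnWhile_once (a b r : Char) (pat rep : String) (hp : pat.toList = [a, b])
    (hr : rep.toList = [r]) (fuel : Nat) (s : String) (hf : s.toList.length ≤ fuel)
    (h : ¬ ([a, b] <:+: pvRepl2 a b r s.toList)) :
    (gcnWhile pat rep fuel s).toList = pvRepl2 a b r s.toList := by
  by_cases hocc : [a, b] <:+: s.toList
  · have hf2 : PySem.Str.find s pat ≠ -1 := (pvFind_iff a b s pat hp).mpr hocc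
    have hlen2 : 2 ≤ s.toList.length := by
      rcases hocc with ⟨u, v, huv⟩
      have : u.length + 2 + v.length = s.toList.length := by
        rw [← huv]; simp; omega
      omega
    match fuel, hf with
    | 0, hf => exact absurd hlen2 (by omega)
    | n + 1, hf =>
      rw [gcnWhile, if_pos hf2]
      have hrep : (PySem.Str.replace s pat rep).toList = pvRepl2 a b r s.toList :=
        pvReplace_eq a b r s pat rep hp hr
      have hfind2 : ¬ (PySem.Str.find (PySem.Str.replace s pat rep) pat ≠ -1) :=
        fun hcon => h (by rw [← hrep]; exact (pvFind_iff a b _ pat hp).mp hcon)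
      match n with
      | 0 => rw [gcnWhile]; exact hrep
      | k + 1 => rw [gcnWhile, if_neg hfind2]; exact hrep
  · rw [pvRepl2_id a b r _ hocc]
    match fuel with
    | 0 => rw [gcnWhile]
    | n + 1 =>
      rw [gcnWhile, if_neg (by rw [not_not]; by_contra hcon; exact hocc ((pvFind_iff a b s pat hp).mp hcon))]

-- ----- one replace pass preserves the normal form -----
def pvUpd (p c : Char) : Char := if c = '-' then '-' else p

theorem pvUpd_sep (p c : Char) (hp : p = ' ' ∨ p = '-') : pvUpd p c = ' ' ∨ pvUpd p c = '-' := by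
  unfold pvUpd; split
  · exact Or.inr rfl
  · exact hp

theorem pvNrm_cons_sep (c : Char) (hc : c = ' ' ∨ c = '-') (u : List Char) :
    pvNrm (c :: u) = pvNrmRun c u := by
  rw [pvNrm, if_pos hc]

theorem pvNrm_cons_nonsep (c : Char) (hc : ¬ (c = ' ' ∨ c = '-')) (u : List Char) :
    pvNrm (c :: u) = c :: pvNrm u := by
  rw [pvNrm, if_neg hc]

theorem pvNrmRun_cons_sep (p c : Char) (hc : c = ' ' ∨ c = '-') (u : List Char) :
    pvNrmRun p (c :: u) = pvNrmRun (pvUpd p c) u := by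
  rcases hc with rfl | rfl <;> simp [pvNrmRun, pvUpd]

theorem pvNrmRun_cons_nonsep (p c : Char) (hc : ¬ (c = ' ' ∨ c = '-')) (u : List Char) :
    pvNrmRun p (c :: u) = p :: c :: pvNrm u := by
  push Not at hc
  rw [pvNrmRun, if_neg (by simpa using hc.2), if_neg (by simpa using hc.1)]

theorem pvNrm_repl2_aux (a b r : Char)
    (ha : a = ' ' ∨ a = '-') (hb : b = ' ' ∨ b = '-') (hrs : r = ' ' ∨ r = '-')
    (hr : (r = '-') ↔ (a = '-' ∨ b = '-')) :
    ∀ (n : Nat) (l : List Char), l.length ≤ n →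
      pvNrm (pvRepl2 a b r l) = pvNrm l ∧
      (∀ p, (p = ' ' ∨ p = '-') → pvNrmRun p (pvRepl2 a b r l) = pvNrmRun p l) := by
  intro n
  induction n with
  | zero =>
    intro l h
    have hl : l = [] := List.eq_nil_of_length_eq_zero (Nat.le_zero.mp h)
    subst hl
    exact ⟨rfl, fun p _ => rfl⟩
  | succ n ih =>
    intro l hlen
    match l with
    | [] => exact ⟨rfl, fun p _ => rfl⟩
    | [x] => exact ⟨rfl, fun p _ => rfl⟩
    | x :: y :: t =>
      have ht : t.length ≤ n := by simp at hlen; omega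
      have hyt : (y :: t).length ≤ n := by simp at hlen ⊢; omega
      by_cases hm : x = a ∧ y = b
      · obtain ⟨rfl, rfl⟩ := hm
        rw [pvRepl2, if_pos (show x = x ∧ y = y from ⟨rfl, rfl⟩)]
        have hupd : r = pvUpd x y := by
          rcases ha with rfl | rfl <;> rcases hb with rfl | rfl <;>
            rcases hrs with rfl | rfl <;> simp_all [pvUpd]
        constructor
        · rw [pvNrm_cons_sep r hrs, pvNrm_cons_sep x ha, pvNrmRun_cons_sep x y hb, ← hupd]
          exact (ih t ht).2 r hrs
        · intro p hp
          rw [pvNrmRun_cons_sep p r hrs, pvNrmRun_cons_sep p x ha, pvNrmRun_cons_sep _ y hb]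
          have hq : pvUpd p r = pvUpd (pvUpd p x) y := by
            rcases ha with rfl | rfl <;> rcases hb with rfl | rfl <;>
              rcases hrs with rfl | rfl <;> simp_all [pvUpd]
          rw [hq]
          exact (ih t ht).2 _ (pvUpd_sep _ _ (pvUpd_sep _ _ hp))
      · rw [pvRepl2]
        simp only [if_neg hm]
        by_cases hx : x = ' ' ∨ x = '-'
        · constructor
          · rw [pvNrm_cons_sep x hx, pvNrm_cons_sep x hx]
            exact (ih _ hyt).2 x hx
          · intro p hp
            rw [pvNrmRun_cons_sep p x hx, pvNrmRun_cons_sep p x hx]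
            exact (ih _ hyt).2 _ (pvUpd_sep _ _ hp)
        · constructor
          · rw [pvNrm_cons_nonsep x hx, pvNrm_cons_nonsep x hx, (ih _ hyt).1]
          · intro p hp
            rw [pvNrmRun_cons_nonsep p x hx, pvNrmRun_cons_nonsep p x hx, (ih _ hyt).1]

theorem pvNrm_repl2 (a b r : Char)
    (ha : a = ' ' ∨ a = '-') (hb : b = ' ' ∨ b = '-') (hrs : r = ' ' ∨ r = '-')
    (hr : (r = '-') ↔ (a = '-' ∨ b = '-')) (l : List Char) :
    pvNrm (pvRepl2 a b r l) = pvNrm l :=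
  (pvNrm_repl2_aux a b r ha hb hrs hr l.length l le_rfl).1


-- ----- prefix/infix helpers -----
theorem pvPrefix2 (a b : Char) (X : List Char) : ([a, b] <+: X) ↔ ∃ u, X = a :: b :: u := by
  constructor
  · rintro ⟨u, rfl⟩; exact ⟨u, rfl⟩
  · rintro ⟨u, rfl⟩; exact ⟨u, rfl⟩

theorem pvPrefix3 (a b c : Char) (X : List Char) :
    ([a, b, c] <+: X) ↔ ∃ u, X = a :: b :: c :: u := by
  constructor
  · rintro ⟨u, rfl⟩; exact ⟨u, rfl⟩
  · rintro ⟨u, rfl⟩; exact ⟨u, rfl⟩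

theorem pvNoPat_tail {p : List Char} {c : Char} {t : List Char}
    (h : ¬ (p <:+: c :: t)) : ¬ (p <:+: t) :=
  fun hc => h (List.infix_cons_iff.mpr (Or.inr hc))

theorem pvHasDSD_mono (c : Char) (t : List Char) (h : pvHasDSD t = true) :
    pvHasDSD (c :: t) = true := by
  simp [pvHasDSD, h]

-- ----- the scanner finds exactly the D_ pattern -----
theorem pvDSD_of_infix (w : List Char) (h : ['-', ' ', '-'] <:+: w) : pvHasDSD w = true := by
  induction w with
  | nil => simp at h
  | cons c t ih =>
    rcases List.infix_cons_iff.mp h with hpre | hinf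
    · obtain ⟨u, hu⟩ := (pvPrefix3 _ _ _ _).mp hpre
      obtain ⟨rfl, rfl⟩ : c = '-' ∧ t = ' ' :: '-' :: u := by
        injection hu with h1 h2; exact ⟨h1, h2⟩
      simp [pvHasDSD, pvAfterD, pvAfterSp]
    · exact pvHasDSD_mono _ _ (ih hinf)

-- ----- one collapsing pass cannot create the D_ pattern -----
theorem pvAfterSp_repl2_sp (u : List Char)
    (h : pvAfterSp (pvRepl2 ' ' ' ' ' ' u) = true) : pvAfterSp u = true := by
  induction u using pvRepl2.induct (a := ' ') (b := ' ') with
  | case1 => simpa [pvRepl2] using h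
  | case2 x => simpa [pvRepl2] using h
  | case3 x y t hc ih =>
    obtain ⟨rfl, rfl⟩ := hc
    rw [pvRepl2, if_pos ⟨rfl, rfl⟩] at h
    rw [pvAfterSp] at h
    simp only [if_pos rfl] at h
    rw [pvAfterSp, if_pos rfl, pvAfterSp, if_pos rfl]
    exact ih h
  | case4 x y t hc ih =>
    rw [pvRepl2, if_neg hc] at h
    rw [pvAfterSp] at h ⊢
    split at h
    · rename_i hx
      rw [if_pos hx]
      exact ih h
    · rename_i hx
      rw [if_neg hx]
      exact h

theorem pvAfterD_repl2_sp (t : List Char)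
    (h : pvAfterD (pvRepl2 ' ' ' ' ' ' t) = true) : pvAfterD t = true := by
  induction t using pvRepl2.induct (a := ' ') (b := ' ') with
  | case1 => simpa [pvRepl2] using h
  | case2 x => simpa [pvRepl2] using h
  | case3 x y t hc _ =>
    obtain ⟨rfl, rfl⟩ := hc
    rw [pvRepl2, if_pos ⟨rfl, rfl⟩] at h
    rw [pvAfterD] at h
    simp at h
    rw [pvAfterD]
    simp [pvAfterSp]
    exact pvAfterSp_repl2_sp t h
  | case4 x y t hc _ =>
    rw [pvRepl2, if_neg hc] at h
    rw [pvAfterD] at h ⊢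
    simp at h ⊢
    exact ⟨h.1, pvAfterSp_repl2_sp _ h.2⟩

theorem pvHasDSD_repl2_sp (m : List Char)
    (h : pvHasDSD (pvRepl2 ' ' ' ' ' ' m) = true) : pvHasDSD m = true := by
  induction m using pvRepl2.induct (a := ' ') (b := ' ') with
  | case1 => simpa [pvRepl2] using h
  | case2 x => simpa [pvRepl2] using h
  | case3 x y t hc ih =>
    obtain ⟨rfl, rfl⟩ := hc
    rw [pvRepl2, if_pos ⟨rfl, rfl⟩] at h
    rw [pvHasDSD] at h
    simp at h
    exact pvHasDSD_mono _ _ (pvHasDSD_mono _ _ (ih (by simpa [pvHasDSD] using h)))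
  | case4 x y t hc ih =>
    rw [pvRepl2, if_neg hc] at h
    rw [pvHasDSD] at h
    simp at h
    rcases h with ⟨rfl, hd⟩ | h
    · rw [pvHasDSD]
      simp [pvAfterD_repl2_sp _ hd]
    · exact pvHasDSD_mono _ _ (ih h)

theorem pvAfterSp_repl2_da (u : List Char)
    (h : pvAfterSp (pvRepl2 '-' '-' '-' u) = true) : pvAfterSp u = true := by
  induction u using pvRepl2.induct (a := '-') (b := '-') with
  | case1 => simpa [pvRepl2] using h
  | case2 x => simpa [pvRepl2] using h
  | case3 x y t hc _ =>
    obtain ⟨rfl, rfl⟩ := hc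
    simp [pvAfterSp]
  | case4 x y t hc ih =>
    rw [pvRepl2, if_neg hc] at h
    rw [pvAfterSp] at h ⊢
    split at h
    · rename_i hx
      rw [if_pos hx]
      exact ih h
    · rename_i hx
      rw [if_neg hx]
      exact h

theorem pvAfterD_repl2_da (t : List Char)
    (h : pvAfterD (pvRepl2 '-' '-' '-' t) = true) : pvAfterD t = true := by
  induction t using pvRepl2.induct (a := '-') (b := '-') with
  | case1 => simpa [pvRepl2] using h
  | case2 x => simpa [pvRepl2] using h
  | case3 x y t hc _ =>
    obtain ⟨rfl, rfl⟩ := hc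
    rw [pvRepl2, if_pos ⟨rfl, rfl⟩] at h
    rw [pvAfterD] at h
    simp at h
  | case4 x y t hc _ =>
    rw [pvRepl2, if_neg hc] at h
    rw [pvAfterD] at h ⊢
    simp at h ⊢
    exact ⟨h.1, pvAfterSp_repl2_da _ h.2⟩

theorem pvHasDSD_repl2_da (m : List Char)
    (h : pvHasDSD (pvRepl2 '-' '-' '-' m) = true) : pvHasDSD m = true := by
  induction m using pvRepl2.induct (a := '-') (b := '-') with
  | case1 => simpa [pvRepl2] using h
  | case2 x => simpa [pvRepl2] using h
  | case3 x y t hc ih =>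
    obtain ⟨rfl, rfl⟩ := hc
    rw [pvRepl2, if_pos ⟨rfl, rfl⟩] at h
    rw [pvHasDSD] at h
    simp at h
    rcases h with hd | h
    · rw [pvHasDSD]
      simp [pvHasDSD, pvAfterD_repl2_da _ hd]
    · exact pvHasDSD_mono _ _ (pvHasDSD_mono _ _ (ih h))
  | case4 x y t hc ih =>
    rw [pvRepl2, if_neg hc] at h
    rw [pvHasDSD] at h
    simp at h
    rcases h with ⟨rfl, hd⟩ | h
    · rw [pvHasDSD]
      simp [pvAfterD_repl2_da _ hd]
    · exact pvHasDSD_mono _ _ (ih h)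

-- dash collapsing cannot create a double space
theorem pvSpSp_repl2_da (m : List Char)
    (h : [' ', ' '] <:+: pvRepl2 '-' '-' '-' m) : [' ', ' '] <:+: m := by
  induction m using pvRepl2.induct (a := '-') (b := '-') with
  | case1 => simpa [pvRepl2] using h
  | case2 x => simpa [pvRepl2] using h
  | case3 x y t hc ih =>
    obtain ⟨rfl, rfl⟩ := hc
    rw [pvRepl2, if_pos ⟨rfl, rfl⟩] at h
    rcases List.infix_cons_iff.mp h with hpre | hinf
    · obtain ⟨u, hu⟩ := (pvPrefix2 _ _ _).mp hpre
      simp at hu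
    · exact List.infix_cons_iff.mpr (Or.inr (List.infix_cons_iff.mpr (Or.inr (ih hinf))))
  | case4 x y t hc ih =>
    rw [pvRepl2, if_neg hc] at h
    rcases List.infix_cons_iff.mp h with hpre | hinf
    · obtain ⟨u, hu⟩ := (pvPrefix2 _ _ _).mp hpre
      obtain ⟨rfl, htl⟩ : x = ' ' ∧ pvRepl2 '-' '-' '-' (y :: t) = ' ' :: u := by
        injection hu with h1 h2; exact ⟨h1, h2⟩
      have hh : (pvRepl2 '-' '-' '-' (y :: t)).head? = some ' ' := by rw [htl]; rfl
      rcases pvRepl2_head '-' '-' '-' (y :: t) ' ' hh with hth | ⟨hr', _⟩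
      · have hy : y = ' ' := by simpa using hth
        subst hy
        exact List.infix_cons_iff.mpr (Or.inl ((pvPrefix2 _ _ _).mpr ⟨t, rfl⟩))
      · simp at hr' 
    · exact List.infix_cons_iff.mpr (Or.inr (ih hinf))

-- ----- after collapsing, the "- " pass leaves no "- " and creates no doubles -----
theorem pvD1 (m : List Char) :
    ¬ ([' ', ' '] <:+: m) → ¬ (['-', '-'] <:+: m) → ¬ (['-', ' ', '-'] <:+: m) →
    ¬ (['-', ' '] <:+: pvRepl2 '-' ' ' '-' m) := by
  induction m using pvRepl2.induct (a := '-') (b := ' ') with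
  | case1 => intro _ _ _; simp [pvRepl2]
  | case2 x => intro _ _ _; simpa [pvRepl2] using pvInf2_single '-' ' ' x
  | case3 x y t hc ih =>
    obtain ⟨rfl, rfl⟩ := hc
    intro h1 h2 h3 hin
    rw [pvRepl2, if_pos ⟨rfl, rfl⟩] at hin
    rcases List.infix_cons_iff.mp hin with hpre | hinf
    · obtain ⟨u, hu⟩ := (pvPrefix2 _ _ _).mp hpre
      have htl : pvRepl2 '-' ' ' '-' t = ' ' :: u := by injection hu
      have hh : (pvRepl2 '-' ' ' '-' t).head? = some ' ' := by rw [htl]; rfl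
      rcases pvRepl2_head '-' ' ' '-' t ' ' hh with hth | ⟨hr', _⟩
      · cases t with
        | nil => simp at hth
        | cons d t' =>
          have hd : d = ' ' := by simpa using hth
          subst hd
          apply h1
          apply List.infix_cons_iff.mpr; right
          exact List.infix_cons_iff.mpr (Or.inl ((pvPrefix2 _ _ _).mpr ⟨t', rfl⟩))
      · simp at hr'
    · exact ih (pvNoPat_tail (pvNoPat_tail h1)) (pvNoPat_tail (pvNoPat_tail h2))
        (pvNoPat_tail (pvNoPat_tail h3)) hinf
  | case4 x y t hc ih =>
    intro h1 h2 h3 hin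
    rw [pvRepl2, if_neg hc] at hin
    rcases List.infix_cons_iff.mp hin with hpre | hinf
    · obtain ⟨u, hu⟩ := (pvPrefix2 _ _ _).mp hpre
      obtain ⟨rfl, htl⟩ : x = '-' ∧ pvRepl2 '-' ' ' '-' (y :: t) = ' ' :: u := by
        injection hu with a1 a2; exact ⟨a1, a2⟩
      have hh : (pvRepl2 '-' ' ' '-' (y :: t)).head? = some ' ' := by rw [htl]; rfl
      rcases pvRepl2_head '-' ' ' '-' (y :: t) ' ' hh with hth | ⟨hr', _⟩
      · exact hc ⟨rfl, by simpa using hth⟩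
      · simp at hr'
    · exact ih (pvNoPat_tail h1) (pvNoPat_tail h2) (pvNoPat_tail h3) hinf

theorem pvD2 (m : List Char) :
    ¬ ([' ', ' '] <:+: m) → ¬ (['-', '-'] <:+: m) → ¬ (['-', ' ', '-'] <:+: m) →
    ¬ ([' ', ' '] <:+: pvRepl2 '-' ' ' '-' m) ∧ ¬ (['-', '-'] <:+: pvRepl2 '-' ' ' '-' m) := by
  induction m using pvRepl2.induct (a := '-') (b := ' ') with
  | case1 => intro _ _ _; constructor <;> simp [pvRepl2]
  | case2 x =>
    intro _ _ _
    exact ⟨by simpa [pvRepl2] using pvInf2_single ' ' ' ' x,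
           by simpa [pvRepl2] using pvInf2_single '-' '-' x⟩
  | case3 x y t hc ih =>
    obtain ⟨rfl, rfl⟩ := hc
    intro h1 h2 h3
    have iht := ih (pvNoPat_tail (pvNoPat_tail h1)) (pvNoPat_tail (pvNoPat_tail h2))
        (pvNoPat_tail (pvNoPat_tail h3))
    rw [pvRepl2, if_pos ⟨rfl, rfl⟩]
    constructor <;> intro hin <;> rcases List.infix_cons_iff.mp hin with hpre | hinf
    · obtain ⟨u, hu⟩ := (pvPrefix2 _ _ _).mp hpre
      simp at hu
    · exact iht.1 hinf
    · obtain ⟨u, hu⟩ := (pvPrefix2 _ _ _).mp hpre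
      have htl : pvRepl2 '-' ' ' '-' t = '-' :: u := by injection hu
      have hh : (pvRepl2 '-' ' ' '-' t).head? = some '-' := by rw [htl]; rfl
      have hth : t.head? = some '-' := by
        rcases pvRepl2_head '-' ' ' '-' t '-' hh with hth | ⟨_, hth⟩ <;> exact hth
      cases t with
      | nil => simp at hth
      | cons d t' =>
        have hd : d = '-' := by simpa using hth
        subst hd
        exact h3 (List.infix_cons_iff.mpr (Or.inl ((pvPrefix3 _ _ _ _).mpr ⟨t', rfl⟩)))
    · exact iht.2 hinf
  | case4 x y t hc ih =>
    intro h1 h2 h3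
    have iht := ih (pvNoPat_tail h1) (pvNoPat_tail h2) (pvNoPat_tail h3)
    rw [pvRepl2, if_neg hc]
    constructor <;> intro hin <;> rcases List.infix_cons_iff.mp hin with hpre | hinf
    · obtain ⟨u, hu⟩ := (pvPrefix2 _ _ _).mp hpre
      obtain ⟨rfl, htl⟩ : x = ' ' ∧ pvRepl2 '-' ' ' '-' (y :: t) = ' ' :: u := by
        injection hu with a1 a2; exact ⟨a1, a2⟩
      have hh : (pvRepl2 '-' ' ' '-' (y :: t)).head? = some ' ' := by rw [htl]; rfl
      rcases pvRepl2_head '-' ' ' '-' (y :: t) ' ' hh with hth | ⟨hr', _⟩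
      · have hy : y = ' ' := by simpa using hth
        subst hy
        exact h1 (List.infix_cons_iff.mpr (Or.inl ((pvPrefix2 _ _ _).mpr ⟨t, rfl⟩)))
      · simp at hr'
    · exact iht.1 hinf
    · obtain ⟨u, hu⟩ := (pvPrefix2 _ _ _).mp hpre
      obtain ⟨rfl, htl⟩ : x = '-' ∧ pvRepl2 '-' ' ' '-' (y :: t) = '-' :: u := by
        injection hu with a1 a2; exact ⟨a1, a2⟩
      have hh : (pvRepl2 '-' ' ' '-' (y :: t)).head? = some '-' := by rw [htl]; rfl
      have hy : y = '-' := by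
        rcases pvRepl2_head '-' ' ' '-' (y :: t) '-' hh with hth | ⟨_, hth⟩ <;> simpa using hth
      subst hy
      exact h2 (List.infix_cons_iff.mpr (Or.inl ((pvPrefix2 _ _ _).mpr ⟨t, rfl⟩)))
    · exact iht.2 hinf

theorem pvD3 (w : List Char) :
    ¬ ([' ', ' '] <:+: w) → ¬ (['-', '-'] <:+: w) → ¬ (['-', ' '] <:+: w) →
    ¬ ([' ', '-'] <:+: pvRepl2 ' ' '-' '-' w) ∧ ¬ ([' ', ' '] <:+: pvRepl2 ' ' '-' '-' w) ∧
    ¬ (['-', '-'] <:+: pvRepl2 ' ' '-' '-' w) ∧ ¬ (['-', ' '] <:+: pvRepl2 ' ' '-' '-' w) := by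
  induction w using pvRepl2.induct (a := ' ') (b := '-') with
  | case1 => intro _ _ _; refine ⟨?_, ?_, ?_, ?_⟩ <;> simp [pvRepl2]
  | case2 x =>
    intro _ _ _
    refine ⟨?_, ?_, ?_, ?_⟩ <;> simpa [pvRepl2] using pvInf2_single _ _ x
  | case3 x y t hc ih =>
    obtain ⟨rfl, rfl⟩ := hc
    intro h1 h2 h3
    have iht := ih (pvNoPat_tail (pvNoPat_tail h1)) (pvNoPat_tail (pvNoPat_tail h2))
        (pvNoPat_tail (pvNoPat_tail h3))
    rw [pvRepl2, if_pos ⟨rfl, rfl⟩]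
    refine ⟨?_, ?_, ?_, ?_⟩ <;> intro hin <;> rcases List.infix_cons_iff.mp hin with hpre | hinf
    · obtain ⟨u, hu⟩ := (pvPrefix2 _ _ _).mp hpre; simp at hu
    · exact iht.1 hinf
    · obtain ⟨u, hu⟩ := (pvPrefix2 _ _ _).mp hpre; simp at hu
    · exact iht.2.1 hinf
    · obtain ⟨u, hu⟩ := (pvPrefix2 _ _ _).mp hpre
      have htl : pvRepl2 ' ' '-' '-' t = '-' :: u := by injection hu
      have hh : (pvRepl2 ' ' '-' '-' t).head? = some '-' := by rw [htl]; rfl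
      rcases pvRepl2_head ' ' '-' '-' t '-' hh with hth | ⟨_, hth⟩
      · cases t with
        | nil => simp at hth
        | cons d t' =>
          have hd : d = '-' := by simpa using hth
          subst hd
          apply h2
          apply List.infix_cons_iff.mpr; right
          exact List.infix_cons_iff.mpr (Or.inl ((pvPrefix2 _ _ _).mpr ⟨t', rfl⟩))
      · cases t with
        | nil => simp at hth
        | cons d t' =>
          have hd : d = ' ' := by simpa using hth
          subst hd
          apply h3
          apply List.infix_cons_iff.mpr; right
          exact List.infix_cons_iff.mpr (Or.inl ((pvPrefix2 _ _ _).mpr ⟨t', rfl⟩))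
    · exact iht.2.2.1 hinf
    · obtain ⟨u, hu⟩ := (pvPrefix2 _ _ _).mp hpre
      have htl : pvRepl2 ' ' '-' '-' t = ' ' :: u := by injection hu
      have hh : (pvRepl2 ' ' '-' '-' t).head? = some ' ' := by rw [htl]; rfl
      rcases pvRepl2_head ' ' '-' '-' t ' ' hh with hth | ⟨hr', _⟩
      · cases t with
        | nil => simp at hth
        | cons d t' =>
          have hd : d = ' ' := by simpa using hth
          subst hd
          apply h3
          apply List.infix_cons_iff.mpr; right
          exact List.infix_cons_iff.mpr (Or.inl ((pvPrefix2 _ _ _).mpr ⟨t', rfl⟩))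
      · simp at hr'
    · exact iht.2.2.2 hinf
  | case4 x y t hc ih =>
    intro h1 h2 h3
    have iht := ih (pvNoPat_tail h1) (pvNoPat_tail h2) (pvNoPat_tail h3)
    rw [pvRepl2, if_neg hc]
    have hhead : ∀ h : Char, (pvRepl2 ' ' '-' '-' (y :: t)).head? = some h →
        y = h ∨ (h = '-' ∧ y = ' ') := by
      intro h hh
      rcases pvRepl2_head ' ' '-' '-' (y :: t) h hh with hth | ⟨hr', hth⟩
      · have : y = h := by simpa using hth
        exact Or.inl this
      · have : y = ' ' := by simpa using hth
        exact Or.inr ⟨hr', this⟩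
    refine ⟨?_, ?_, ?_, ?_⟩ <;> intro hin <;> rcases List.infix_cons_iff.mp hin with hpre | hinf
    · obtain ⟨u, hu⟩ := (pvPrefix2 _ _ _).mp hpre
      obtain ⟨rfl, htl⟩ : x = ' ' ∧ pvRepl2 ' ' '-' '-' (y :: t) = '-' :: u := by
        injection hu with a1 a2; exact ⟨a1, a2⟩
      rcases hhead '-' (by rw [htl]; rfl) with rfl | ⟨_, rfl⟩
      · exact hc ⟨rfl, rfl⟩
      · exact h1 (List.infix_cons_iff.mpr (Or.inl ((pvPrefix2 _ _ _).mpr ⟨t, rfl⟩)))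
    · exact iht.1 hinf
    · obtain ⟨u, hu⟩ := (pvPrefix2 _ _ _).mp hpre
      obtain ⟨rfl, htl⟩ : x = ' ' ∧ pvRepl2 ' ' '-' '-' (y :: t) = ' ' :: u := by
        injection hu with a1 a2; exact ⟨a1, a2⟩
      rcases hhead ' ' (by rw [htl]; rfl) with rfl | ⟨hr', _⟩
      · exact h1 (List.infix_cons_iff.mpr (Or.inl ((pvPrefix2 _ _ _).mpr ⟨t, rfl⟩)))
      · simp at hr'
    · exact iht.2.1 hinf
    · obtain ⟨u, hu⟩ := (pvPrefix2 _ _ _).mp hpre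
      obtain ⟨rfl, htl⟩ : x = '-' ∧ pvRepl2 ' ' '-' '-' (y :: t) = '-' :: u := by
        injection hu with a1 a2; exact ⟨a1, a2⟩
      rcases hhead '-' (by rw [htl]; rfl) with rfl | ⟨_, rfl⟩
      · exact h2 (List.infix_cons_iff.mpr (Or.inl ((pvPrefix2 _ _ _).mpr ⟨t, rfl⟩)))
      · exact h3 (List.infix_cons_iff.mpr (Or.inl ((pvPrefix2 _ _ _).mpr ⟨t, rfl⟩)))
    · exact iht.2.2.1 hinf
    · obtain ⟨u, hu⟩ := (pvPrefix2 _ _ _).mp hpre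
      obtain ⟨rfl, htl⟩ : x = '-' ∧ pvRepl2 ' ' '-' '-' (y :: t) = ' ' :: u := by
        injection hu with a1 a2; exact ⟨a1, a2⟩
      rcases hhead ' ' (by rw [htl]; rfl) with rfl | ⟨hr', _⟩
      · exact h3 (List.infix_cons_iff.mpr (Or.inl ((pvPrefix2 _ _ _).mpr ⟨t, rfl⟩)))
      · simp at hr'
    · exact iht.2.2.2 hinf

-- ----- a fully separated string is its own normal form -----
theorem pvNrm_id_aux : ∀ (n : Nat) (F : List Char), F.length ≤ n →
    ¬ ([' ', ' '] <:+: F) → ¬ (['-', '-'] <:+: F) →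
    ¬ (['-', ' '] <:+: F) → ¬ ([' ', '-'] <:+: F) →
    pvNrm F = F := by
  intro n
  induction n with
  | zero =>
    intro F h _ _ _ _
    rw [List.eq_nil_of_length_eq_zero (Nat.le_zero.mp h)]
    rfl
  | succ n ih =>
    intro F hlen h1 h2 h3 h4
    match F with
    | [] => rfl
    | c :: t =>
      by_cases hc : c = ' ' ∨ c = '-'
      · rw [pvNrm_cons_sep c hc]
        cases t with
        | nil => rcases hc with rfl | rfl <;> rfl
        | cons d t' =>
          by_cases hd : d = ' ' ∨ d = '-'
          · exfalso
            rcases hc with rfl | rfl <;> rcases hd with rfl | rfl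
            · exact h1 (List.infix_cons_iff.mpr (Or.inl ((pvPrefix2 _ _ _).mpr ⟨t', rfl⟩)))
            · exact h4 (List.infix_cons_iff.mpr (Or.inl ((pvPrefix2 _ _ _).mpr ⟨t', rfl⟩)))
            · exact h3 (List.infix_cons_iff.mpr (Or.inl ((pvPrefix2 _ _ _).mpr ⟨t', rfl⟩)))
            · exact h2 (List.infix_cons_iff.mpr (Or.inl ((pvPrefix2 _ _ _).mpr ⟨t', rfl⟩)))
          · rw [pvNrmRun_cons_nonsep c d hd]
            have ht' : pvNrm t' = t' := by
              apply ih t' (by simp at hlen; omega)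
              · exact pvNoPat_tail (pvNoPat_tail h1)
              · exact pvNoPat_tail (pvNoPat_tail h2)
              · exact pvNoPat_tail (pvNoPat_tail h3)
              · exact pvNoPat_tail (pvNoPat_tail h4)
            rw [ht']
      · rw [pvNrm_cons_nonsep c hc]
        have ht : pvNrm t = t := by
          apply ih t (by simp at hlen; omega)
          · exact pvNoPat_tail h1
          · exact pvNoPat_tail h2
          · exact pvNoPat_tail h3
          · exact pvNoPat_tail h4
        rw [ht]

theorem pvNrm_id (F : List Char)
    (h1 : ¬ ([' ', ' '] <:+: F)) (h2 : ¬ (['-', '-'] <:+: F))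
    (h3 : ¬ (['-', ' '] <:+: F)) (h4 : ¬ ([' ', '-'] <:+: F)) :
    pvNrm F = F :=
  pvNrm_id_aux F.length F le_rfl h1 h2 h3 h4

-- ----- capitalization layer -----
def pvCapS : Option Char → List Char → List Char
  | _, [] => []
  | p, c :: t =>
    (if p = none ∨ p = some ' ' ∨ p = some '-' then PySem.Chars.upperChar c else c) ::
      pvCapS (some c) t

theorem pvUpperChar_sep (a : Char) (ha : a = ' ' ∨ a = '-') : PySem.Chars.upperChar a = a := by
  rcases ha with rfl | rfl <;> decide

theorem pvCapS_none_cons (c : Char) (t : List Char) :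
    pvCapS none (c :: t) = PySem.Chars.upperChar c :: pvCapS (some c) t := by
  simp [pvCapS]

theorem pvCapS_some_cons (p c : Char) (t : List Char) :
    pvCapS (some p) (c :: t) =
      (if p = ' ' ∨ p = '-' then PySem.Chars.upperChar c else c) :: pvCapS (some c) t := by
  simp [pvCapS]

theorem pvCapS_sep_single (a : Char) (ha : a = ' ' ∨ a = '-') (p : Option Char) :
    pvCapS p [a] = [a] := by
  cases p with
  | none => rw [pvCapS_none_cons, pvUpperChar_sep a ha]; rfl
  | some q =>
    rw [pvCapS_some_cons]
    split
    · rw [pvUpperChar_sep a ha]; rfl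
    · rfl

-- A's capitalization test agrees with "previous char is a separator"
theorem pvCond_eq (p c : Char) :
    (if (c ≠ ' ' ∧ p = ' ') ∨ (c ≠ '-' ∧ p = '-') then PySem.Chars.upperChar c else c) =
    (if p = ' ' ∨ p = '-' then PySem.Chars.upperChar c else c) := by
  by_cases hp : p = ' ' ∨ p = '-'
  · rw [if_pos hp]
    rcases hp with rfl | rfl
    · by_cases hcc : c = ' '
      · subst hcc; decide
      · rw [if_pos (Or.inl ⟨hcc, rfl⟩)]
    · by_cases hcc : c = '-'
      · subst hcc; decide
      · rw [if_pos (Or.inr ⟨hcc, rfl⟩)]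
  · rw [if_neg hp, if_neg]
    rintro (⟨_, h⟩ | ⟨_, h⟩)
    · exact hp (Or.inl h)
    · exact hp (Or.inr h)

theorem pvCapGo_eq : ∀ (fuel index : Nat) (s res : List Char),
    1 ≤ index → s.length ≤ index + fuel →
    gcnCapGo s index fuel res = res ++ pvCapS (some (s.getD (index - 1) ' ')) (s.drop index) := by
  intro fuel
  induction fuel with
  | zero =>
    intro index s res h1 h2
    rw [gcnCapGo, List.drop_eq_nil_of_le (by omega)]
    simp [pvCapS]
  | succ n ih =>
    intro index s res h1 h2
    rw [gcnCapGo]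
    by_cases hlt : index < s.length
    · rw [if_pos hlt]
      rw [ih (index + 1) s _ (by omega) (by omega)]
      have hdrop : s.drop index = s[index] :: s.drop (index + 1) := List.drop_eq_getElem_cons hlt
      have hgetD : s.getD index ' ' = s[index] := by
        rw [List.getD_eq_getElem?_getD, List.getElem?_eq_getElem hlt]; rfl
      rw [hdrop, pvCapS_some_cons]
      rw [pvCond_eq (s.getD (index - 1) ' ') (s.getD index ' ')]
      simp only [Nat.add_sub_cancel, hgetD, List.append_assoc, List.singleton_append]
    · rw [if_neg hlt, List.drop_eq_nil_of_le (by omega)]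
      simp [pvCapS]

-- pvCapS applied to a run's normal form does not depend on the previous character
theorem pvCapS_nrmRun_irrel_aux : ∀ (n : Nat) (l : List Char) (a : Char), l.length ≤ n →
    (a = ' ' ∨ a = '-') → ∀ p q : Option Char,
    pvCapS p (pvNrmRun a l) = pvCapS q (pvNrmRun a l) := by
  intro n
  induction n with
  | zero =>
    intro l a hlen ha p q
    rw [List.eq_nil_of_length_eq_zero (Nat.le_zero.mp hlen), pvNrmRun]
    rw [pvCapS_sep_single a ha, pvCapS_sep_single a ha]
  | succ n ih =>
    intro l a hlen ha p q
    match l with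
    | [] => rw [pvNrmRun, pvCapS_sep_single a ha, pvCapS_sep_single a ha]
    | c :: t =>
      by_cases hcsep : c = ' ' ∨ c = '-'
      · rw [pvNrmRun_cons_sep a c hcsep]
        exact ih t _ (by simp at hlen; omega) (pvUpd_sep a c ha) p q
      · rw [pvNrmRun_cons_nonsep a c hcsep]
        have key : ∀ pp : Option Char,
            pvCapS pp (a :: c :: pvNrm t) = a :: pvCapS (some a) (c :: pvNrm t) := by
          intro pp
          cases pp with
          | none => rw [pvCapS_none_cons, pvUpperChar_sep a ha]
          | some q' =>
            rw [pvCapS_some_cons]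
            split
            · rw [pvUpperChar_sep a ha]
            · rfl
        rw [key p, key q]

theorem pvCapS_nrmRun_irrel (l : List Char) (a : Char) (ha : a = ' ' ∨ a = '-')
    (p q : Option Char) : pvCapS p (pvNrmRun a l) = pvCapS q (pvNrmRun a l) :=
  pvCapS_nrmRun_irrel_aux l.length l a le_rfl ha p q

-- ----- B's fold computes pvCapS none ∘ pvNrm -----
theorem pvFold_spec : ∀ (l : List Char),
    (∀ (out : List Char) (a : Char), (a = ' ' ∨ a = '-') →
      ((l.foldl gcnStep (out, some a)).1 ++ (l.foldl gcnStep (out, some a)).2.toList) = out ++ pvCapS (some '-') (pvNrmRun a l)) ∧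
    (∀ (out : List Char) (x : Char), out ≠ [] → ¬ (x = ' ' ∨ x = '-') →
      ((l.foldl gcnStep (out, none)).1 ++ (l.foldl gcnStep (out, none)).2.toList) = out ++ pvCapS (some x) (pvNrm l)) := by
  intro l
  induction l with
  | nil =>
    constructor
    · intro out a ha
      simp only [List.foldl_nil, Option.toList_some]
      rw [pvNrmRun]
      rw [pvCapS_sep_single a ha]
    · intro out x hout hx
      simp [List.foldl, pvNrm, pvCapS]
  | cons c t ih =>
    constructor
    · intro out a ha
      rw [List.foldl_cons]
      by_cases hcsep : c = ' ' ∨ c = '-'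
      · have hstep : gcnStep (out, some a) c = (out, some (pvUpd a c)) := by
          rcases ha with rfl | rfl <;> rcases hcsep with rfl | rfl <;>
            simp [gcnStep, pvUpd]
        rw [hstep, ih.1 out (pvUpd a c) (pvUpd_sep a c ha), pvNrmRun_cons_sep a c hcsep]
      · have hstep : gcnStep (out, some a) c =
            (out ++ [a, PySem.Chars.upperChar c], none) := by
          simp [gcnStep, hcsep]
        rw [hstep, ih.2 (out ++ [a, PySem.Chars.upperChar c]) c (by simp) hcsep]
        rw [pvNrmRun_cons_nonsep a c hcsep, pvCapS_some_cons, pvUpperChar_sep a ha]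
        rw [pvCapS_some_cons, if_pos ha]
        simp
    · intro out x hout hx
      rw [List.foldl_cons]
      by_cases hcsep : c = ' ' ∨ c = '-'
      · have hstep : gcnStep (out, none) c = (out, some c) := by
          rcases hcsep with rfl | rfl <;> simp [gcnStep]
        rw [hstep, ih.1 out c hcsep, pvNrm_cons_sep c hcsep]
        rw [pvCapS_nrmRun_irrel t c hcsep (some '-') (some x)]
      · have hstep : gcnStep (out, none) c = (out ++ [c], none) := by
          simp [gcnStep, hcsep, hout]
        rw [hstep, ih.2 (out ++ [c]) c (by simp) hcsep]
        rw [pvNrm_cons_nonsep c hcsep, pvCapS_some_cons, if_neg hx]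
        simp

theorem pvFold_start (l : List Char) :
    ((l.foldl gcnStep ([], none)).1 ++ (l.foldl gcnStep ([], none)).2.toList) = pvCapS none (pvNrm l) := by
  cases l with
  | nil => simp [List.foldl, pvNrm, pvCapS]
  | cons c t =>
    rw [List.foldl_cons]
    by_cases hcsep : c = ' ' ∨ c = '-'
    · have hstep : gcnStep (([] : List Char), none) c = ([], some c) := by
        rcases hcsep with rfl | rfl <;> simp [gcnStep]
      rw [hstep, (pvFold_spec t).1 [] c hcsep, pvNrm_cons_sep c hcsep]
      rw [pvCapS_nrmRun_irrel t c hcsep (some '-') none]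
      rfl
    · have hstep : gcnStep (([] : List Char), none) c =
          ([PySem.Chars.upperChar c], none) := by
        simp [gcnStep, hcsep]
      rw [hstep, (pvFold_spec t).2 [PySem.Chars.upperChar c] c (by simp) hcsep]
      rw [pvNrm_cons_nonsep c hcsep, pvCapS_none_cons]
      rfl

theorem pvAlt_eq (s : String) :
    get_correct_name_alt s = String.ofList (pvCapS none (pvNrm s.toList)) := by
  show String.ofList ((s.toList.foldl gcnStep ([], none)).1 ++
    (s.toList.foldl gcnStep ([], none)).2.toList) = _
  rw [pvFold_start]

-- ===== VERDICT =====

-- ----- assembling the four passes: outside D_, A's loops compute the normal form -----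
theorem pvMain (s : String) (hne : s.toList ≠ []) (hD : pvHasDSD s.toList = false) :
    get_correct_name s = get_correct_name_alt s := by
  unfold get_correct_name
  simp only []
  set s1 := gcnWhile "  " " " s.toList.length s with hs1def
  set s2 := gcnWhile "--" "-" s1.toList.length s1 with hs2def
  set s3 := gcnWhile "- " "-" s2.toList.length s2 with hs3def
  set s4 := gcnWhile " -" "-" s3.toList.length s3 with hs4def
  -- stage 1: collapse double spaces
  have h1nosp : ¬ ([' ', ' '] <:+: s1.toList) :=
    gcnWhile_exit ' ' ' ' (r := ' ') "  " " " (by decide) (by decide) _ s le_rfl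
  have nrm1 : pvNrm s1.toList = pvNrm s.toList :=
    gcnWhile_inv ' ' ' ' ' ' "  " " " (by decide) (by decide)
      (fun m => pvNrm m = pvNrm s.toList)
      (fun m hm => by
        show pvNrm (pvRepl2 ' ' ' ' ' ' m) = pvNrm s.toList
        rw [pvNrm_repl2 ' ' ' ' ' ' (Or.inl rfl) (Or.inl rfl) (Or.inl rfl) (by decide) m, hm])
      _ s rfl
  have dsd1 : pvHasDSD s1.toList = false :=
    gcnWhile_inv ' ' ' ' ' ' "  " " " (by decide) (by decide)
      (fun m => pvHasDSD m = false)
      (fun m hm => by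
        show pvHasDSD (pvRepl2 ' ' ' ' ' ' m) = false
        cases hh : pvHasDSD (pvRepl2 ' ' ' ' ' ' m)
        · rfl
        · exact absurd (pvHasDSD_repl2_sp m hh) (by simp [hm]))
      _ s hD
  have ne1 : s1.toList ≠ [] :=
    gcnWhile_inv ' ' ' ' ' ' "  " " " (by decide) (by decide) (fun m => m ≠ [])
      (fun m hm => pvRepl2_ne_nil _ _ _ m hm) _ s hne
  -- stage 2: collapse double dashes
  have h2noda : ¬ (['-', '-'] <:+: s2.toList) :=
    gcnWhile_exit '-' '-' (r := '-') "--" "-" (by decide) (by decide) _ s1 le_rfl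
  have h2nosp : ¬ ([' ', ' '] <:+: s2.toList) :=
    gcnWhile_inv '-' '-' '-' "--" "-" (by decide) (by decide)
      (fun m => ¬ ([' ', ' '] <:+: m))
      (fun m hm hc => hm (pvSpSp_repl2_da m hc)) _ s1 h1nosp
  have nrm2 : pvNrm s2.toList = pvNrm s.toList := by
    rw [← nrm1]
    exact gcnWhile_inv '-' '-' '-' "--" "-" (by decide) (by decide)
      (fun m => pvNrm m = pvNrm s1.toList)
      (fun m hm => by
        show pvNrm (pvRepl2 '-' '-' '-' m) = pvNrm s1.toList
        rw [pvNrm_repl2 '-' '-' '-' (Or.inr rfl) (Or.inr rfl) (Or.inr rfl) (by decide) m, hm])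
      _ s1 rfl
  have dsd2 : pvHasDSD s2.toList = false :=
    gcnWhile_inv '-' '-' '-' "--" "-" (by decide) (by decide)
      (fun m => pvHasDSD m = false)
      (fun m hm => by
        show pvHasDSD (pvRepl2 '-' '-' '-' m) = false
        cases hh : pvHasDSD (pvRepl2 '-' '-' '-' m)
        · rfl
        · exact absurd (pvHasDSD_repl2_da m hh) (by simp [hm]))
      _ s1 dsd1
  have ne2 : s2.toList ≠ [] :=
    gcnWhile_inv '-' '-' '-' "--" "-" (by decide) (by decide) (fun m => m ≠ [])
      (fun m hm => pvRepl2_ne_nil _ _ _ m hm) _ s1 ne1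
  have h2nodsd : ¬ (['-', ' ', '-'] <:+: s2.toList) :=
    fun hc => absurd (pvDSD_of_infix _ hc) (by simp [dsd2])
  -- stage 3: the "- " pass fires exactly once
  have hs3 : s3.toList = pvRepl2 '-' ' ' '-' s2.toList :=
    gcnWhile_once '-' ' ' '-' "- " "-" (by decide) (by decide) _ s2 le_rfl
      (pvD1 s2.toList h2nosp h2noda h2nodsd)
  have h3nods : ¬ (['-', ' '] <:+: s3.toList) := by
    rw [hs3]; exact pvD1 s2.toList h2nosp h2noda h2nodsd
  have h3sp := pvD2 s2.toList h2nosp h2noda h2nodsd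
  have h3nosp : ¬ ([' ', ' '] <:+: s3.toList) := by rw [hs3]; exact h3sp.1
  have h3noda : ¬ (['-', '-'] <:+: s3.toList) := by rw [hs3]; exact h3sp.2
  have nrm3 : pvNrm s3.toList = pvNrm s.toList := by
    rw [hs3, pvNrm_repl2 '-' ' ' '-' (Or.inr rfl) (Or.inl rfl) (Or.inr rfl) (by decide), nrm2]
  have ne3 : s3.toList ≠ [] := by rw [hs3]; exact pvRepl2_ne_nil _ _ _ _ ne2
  -- stage 4: the " -" pass fires exactly once
  have hD3 := pvD3 s3.toList h3nosp h3noda h3nods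
  have hs4 : s4.toList = pvRepl2 ' ' '-' '-' s3.toList :=
    gcnWhile_once ' ' '-' '-' " -" "-" (by decide) (by decide) _ s3 le_rfl hD3.1
  have nrm4 : pvNrm s4.toList = pvNrm s.toList := by
    rw [hs4, pvNrm_repl2 ' ' '-' '-' (Or.inl rfl) (Or.inr rfl) (Or.inr rfl) (by decide), nrm3]
  have ne4 : s4.toList ≠ [] := by rw [hs4]; exact pvRepl2_ne_nil _ _ _ _ ne3
  have hfinal : s4.toList = pvNrm s.toList := by
    have hid : pvNrm s4.toList = s4.toList := by
      rw [hs4]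
      exact pvNrm_id _ hD3.2.1 hD3.2.2.1 hD3.2.2.2 hD3.1
    calc s4.toList = pvNrm s4.toList := hid.symm
      _ = pvNrm s.toList := nrm4
  -- read off both sides
  rw [pvAlt_eq s]
  obtain ⟨c, t, hw⟩ : ∃ c t, s4.toList = c :: t := by
    cases hx : s4.toList with
    | nil => exact absurd hx ne4
    | cons c t => exact ⟨c, t, rfl⟩
  have hget : PySem.Str.pyGet? s4 0 = some c := by
    show PySem.Chars.pyGet? s4.toList 0 = some c
    rw [hw]
    simp [PySem.Chars.pyGet?_eq_listPyGet?, PySem.List.pyGet?, PySem.List.pyIdx?]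
  rw [hget]
  show (if 1 < s4.toList.length then
      String.ofList (gcnCapGo s4.toList 1 s4.toList.length [PySem.Chars.upperChar c])
    else String.ofList [PySem.Chars.upperChar c]) =
    String.ofList (pvCapS none (pvNrm s.toList))
  rw [← hfinal, hw]
  cases t with
  | nil =>
    rw [if_neg (by simp)]
    simp [pvCapS]
  | cons d t' =>
    rw [if_pos (by simp)]
    rw [pvCapGo_eq (c :: d :: t').length 1 (c :: d :: t') [PySem.Chars.upperChar c]
      le_rfl (by simp)]
    rw [pvCapS_none_cons]
    simp [pvCapS_some_cons]

theorem get_correct_name_spec : Claim_unchanged_get_correct_name := by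
  intro s hdom hpre hD
  apply pvMain
  · intro hc; exact hpre (String.toList_eq_nil_iff.mp hc)
  · cases hh : pvHasDSD s.toList with
    | false => rfl
    | true => exact absurd ((pvD_iff s).mpr hh) hD

theorem get_correct_name_changed : Claim_changed_get_correct_name := by
  unfold Claim_changed_get_correct_name; decide
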